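-- pv_equiv track=rewrite | github.com/Datamuseum-DK/FloppyTools | fluxstream.py | iter_pattern
-- ===== SOURCE A (Python) =====
-- def iter_pattern(fm, gaplen=128, minlen=128, pattern=None):
--     ''' Iterate through all gaps in fm-string '''
--     off = 0
--     if pattern is None:
--         pattern = '--' * gaplen + "##"
--     minlen *= 16 + len(pattern)
--     while True:
--         nxt = fm.find(pattern, off)
--         if nxt < 0 or len(fm) - nxt < minlen:
--             return
--         yield nxt + len(pattern)
--         off = nxt + 1
-- ===== SOURCE B (Python) =====
-- def iter_pattern(fm, gaplen=128, minlen=128, pattern=None):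
--     ''' Iterate through all gaps in fm-string '''
--     if pattern is None:
--         pattern = '--' * gaplen + "##"
--     minlen *= 16 + len(pattern)
--     L = len(pattern)
--     starts = [i for i in range(len(fm) - L + 1) if fm[i:i+L] == pattern]
--     for i in starts:
--         if i + minlen > len(fm):
--             break
--         yield i + L
-- ===== Notes on version B (the rewrite author's own statement) =====
-- stated objective: alternative
-- what changed: A interleaves searching and emitting in one while-True loop that rescans with fm.find(pattern, off); B decomposes into two staged passes: a comprehension that first collects every overlapping match start by slice comparison, then a separate emit loop that breaks at the first start past the length limit.
import Mathlib
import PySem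

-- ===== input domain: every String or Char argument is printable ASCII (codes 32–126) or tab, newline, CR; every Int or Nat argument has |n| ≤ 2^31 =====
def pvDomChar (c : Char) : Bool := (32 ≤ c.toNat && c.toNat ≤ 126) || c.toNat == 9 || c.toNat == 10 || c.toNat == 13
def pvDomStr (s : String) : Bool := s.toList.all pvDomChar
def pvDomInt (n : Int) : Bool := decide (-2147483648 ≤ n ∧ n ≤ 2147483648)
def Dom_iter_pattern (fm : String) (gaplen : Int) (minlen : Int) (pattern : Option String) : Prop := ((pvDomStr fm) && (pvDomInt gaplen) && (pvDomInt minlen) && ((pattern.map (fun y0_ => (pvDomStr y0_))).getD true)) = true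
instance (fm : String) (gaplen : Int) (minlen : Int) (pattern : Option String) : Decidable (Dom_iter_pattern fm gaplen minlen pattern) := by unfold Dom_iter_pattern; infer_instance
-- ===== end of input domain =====

-- B stages the work in two passes — first collect every match start by slice comparison over a
-- range, then emit until the length limit — instead of A's incremental find-rescan loop
-- (an alternative, equally exact decomposition; no speed claim).

-- ===== PORT A =====
-- A's `while True` loop; the fuel argument (len fm + 1) only makes the recursion structural —
-- off strictly increases each iteration, so the fuel never runs out before A's own `return`
def iterPatternLoopA (fmL patL : List Char) (m : Int) (off : Nat) (fuel : Nat) : List Int :=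
  match fuel with
  | 0 => []
  | fuel + 1 =>
    let nxt := PySem.Chars.findFrom fmL patL (off : Int) none
    if nxt < 0 ∨ (fmL.length : Int) - nxt < m then []
    else (nxt + (patL.length : Int)) :: iterPatternLoopA fmL patL m (nxt.toNat + 1) fuel

def iter_pattern (fm : String) (gaplen : Int) (minlen : Int) (pattern : Option String) : List Int :=
  let fmL := fm.toList
  let patL := match pattern with
    | none => PySem.List.pyRepeat ['-', '-'] gaplen ++ ['#', '#']   -- '--' * gaplen + "##"
    | some p => p.toList
  let m := minlen * (16 + (patL.length : Int))                      -- minlen *= 16 + len(pattern)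
  iterPatternLoopA fmL patL m 0 (fmL.length + 1)

-- ===== PORT B =====
-- starts = [i for i in range(len(fm) - L + 1) if fm[i:i+L] == pattern]   (pass 1),
-- then for i in starts: break past the limit, else yield i + L           (pass 2)
def iter_pattern_alt (fm : String) (gaplen : Int) (minlen : Int) (pattern : Option String) : List Int :=
  let fmL := fm.toList
  let patL := match pattern with
    | none => PySem.List.pyRepeat ['-', '-'] gaplen ++ ['#', '#']
    | some p => p.toList
  let m := minlen * (16 + (patL.length : Int))
  let L := (patL.length : Int)
  let starts := (PySem.List.pyRange 0 ((fmL.length : Int) - L + 1) 1).filter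
      (fun i => PySem.List.slice fmL (some i) (some (i + L)) == patL)
  (starts.takeWhile (fun i => !decide (i + m > (fmL.length : Int)))).map (fun i => i + L)

-- ===== PRECONDITION & SPEC =====
def Spec_iter_pattern (fm : String) (gaplen : Int) (minlen : Int) (pattern : Option String) (out : List Int) : Prop := out = iter_pattern_alt fm gaplen minlen pattern
instance (fm : String) (gaplen : Int) (minlen : Int) (pattern : Option String) (out : List Int) : Decidable (Spec_iter_pattern fm gaplen minlen pattern out) := by unfold Spec_iter_pattern; infer_instance

-- ===== CLAIM (what is proved, stated in full; the proofs are below) =====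
def Claim_equal_iter_pattern : Prop := ∀ (fm : String) (gaplen : Int) (minlen : Int) (pattern : Option String), Dom_iter_pattern fm gaplen minlen pattern → Spec_iter_pattern fm gaplen minlen pattern (iter_pattern fm gaplen minlen pattern)

-- ===== LEMMAS AND PROOFS =====

-- "pattern matches fm at position i"
def matchB (fmL patL : List Char) (i : Nat) : Bool := PySem.Chars.startswith (fmL.drop i) patL

-- all match positions in [off, len fm], in increasing order
def matchesFrom (fmL patL : List Char) (off : Nat) : List Nat :=
  (List.range' off (fmL.length + 1 - off)).filter (matchB fmL patL)

theorem matchesFrom_nil (fmL patL : List Char) (off : Nat)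
    (h : ∀ i, off ≤ i → matchB fmL patL i = false) : matchesFrom fmL patL off = [] := by
  unfold matchesFrom
  apply List.filter_eq_nil_iff.mpr
  intro i hi
  have := (List.mem_range'_1.mp hi).1
  simp [h i this]

theorem matchesFrom_cons (fmL patL : List Char) (off j : Nat)
    (h2 : off ≤ j) (h1 : j ≤ fmL.length) (hm : matchB fmL patL j = true)
    (hno : ∀ i, off ≤ i → i < j → matchB fmL patL i = false) :
    matchesFrom fmL patL off = j :: matchesFrom fmL patL (j + 1) := by
  unfold matchesFrom
  have hsplit : List.range' off (fmL.length + 1 - off) =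
      List.range' off (j - off) ++ List.range' j (fmL.length + 1 - j) := by
    have := @List.range'_append off (j - off) (fmL.length + 1 - j) 1
    rw [one_mul] at this
    rw [show off + (j - off) = j by omega] at this
    rw [this, show j - off + (fmL.length + 1 - j) = fmL.length + 1 - off by omega]
  rw [hsplit, List.filter_append]
  have hfirst : (List.range' off (j - off)).filter (matchB fmL patL) = [] := by
    apply List.filter_eq_nil_iff.mpr
    intro i hi
    have h := List.mem_range'_1.mp hi
    simp [hno i h.1 (by omega)]
  rw [hfirst, List.nil_append,
      show fmL.length + 1 - j = (fmL.length - j) + 1 by omega, List.range'_succ,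
      List.filter_cons_of_pos hm,
      show j + 1 * 1 = j + 1 by omega,
      show fmL.length - j = fmL.length + 1 - (j + 1) by omega]

theorem findFrom_past (s sub : List Char) :
    PySem.Chars.findFrom s sub ((s.length : Int) + 1) none = -1 := by
  unfold PySem.Chars.findFrom
  simp only []
  have h1 : ¬ ((s.length : Int) + 1 < 0) := by omega
  simp only [if_neg h1]
  rw [if_pos (by omega)]

-- a prefix of a suffix of l is an infix of l
theorem prefix_drop_infix {α : Type} (sub l : List α) (k i : Nat) (hk : k ≤ i)
    (h : sub <+: l.drop i) : sub <:+: l.drop k := by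
  have : l.drop i = (l.drop k).drop (i - k) := by
    rw [List.drop_drop]; congr 1; omega
  rw [this] at h
  exact h.isInfix.trans (List.drop_suffix _ _).isInfix

theorem loopA_eq (fmL patL : List Char) (m : Int) :
    ∀ fuel off, off ≤ fmL.length + 1 → fmL.length + 1 - off ≤ fuel →
    iterPatternLoopA fmL patL m off fuel =
    ((matchesFrom fmL patL off).takeWhile
        (fun i : Nat => decide ((i : Int) ≤ (fmL.length : Int) - m))).map
      (fun i : Nat => (i : Int) + (patL.length : Int)) := by
  intro fuel
  induction fuel with
  | zero =>
    intro off h1 h2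
    have h0 : fmL.length + 1 - off = 0 := by omega
    simp [iterPatternLoopA, matchesFrom, h0]
  | succ fuel ih =>
    intro off h1 h2
    by_cases hoff : off = fmL.length + 1
    · subst hoff
      simp [iterPatternLoopA, matchesFrom, findFrom_past]
    · have hle : off ≤ fmL.length := by omega
      rw [iterPatternLoopA]
      by_cases hn : PySem.Chars.findFrom fmL patL (off : Int) none = -1
      · rw [hn, if_pos (Or.inl (by omega))]
        rw [matchesFrom_nil]
        · simp
        · intro i hi
          have hninf := (PySem.Chars.findFrom_natCast_eq_neg_one_iff fmL patL off hle).mp hn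
          by_contra hmB
          simp only [Bool.not_eq_false, matchB, PySem.Chars.startswith_iff] at hmB
          exact hninf (prefix_drop_infix patL fmL off i hi hmB)
      · obtain ⟨hge, hpre, hmin⟩ := PySem.Chars.findFrom_natCast_spec fmL patL off hle hn
        set r := PySem.Chars.findFrom fmL patL (off : Int) none with hr
        have hr0 : (0 : Int) ≤ r := le_trans (by omega) hge
        have hjr : r = ((r.toNat : Nat) : Int) := (Int.toNat_of_nonneg hr0).symm
        have hoffj : off ≤ r.toNat := by omega
        have hjlen : r.toNat ≤ fmL.length := by
          by_cases hp : patL = []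
          · have heq := PySem.Chars.findFrom_natCast fmL patL off hle
            rw [← hr] at heq
            rw [hp, PySem.Chars.find_nil] at heq
            norm_num at heq
            omega
          · have hne : fmL.drop r.toNat ≠ [] := fun hnil => hp (List.prefix_nil.mp (hnil ▸ hpre))
            by_contra hgt
            exact hne (List.drop_eq_nil_of_le (by omega))
        have hmB : matchB fmL patL r.toNat = true := by
          simp only [matchB, PySem.Chars.startswith_iff]
          exact hpre
        rw [matchesFrom_cons fmL patL off r.toNat hoffj hjlen hmB
            (fun i hi1 hi2 => by
              have := hmin i hi1 hi2
              simp only [matchB, Bool.eq_false_iff, ne_eq, PySem.Chars.startswith_iff]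
              exact this)]
        rw [List.takeWhile_cons]
        by_cases hcond : (fmL.length : Int) - r < m
        · rw [if_pos (Or.inr hcond)]
          have hfalse : (decide (((r.toNat : Nat) : Int) ≤ (fmL.length : Int) - m)) = false := by
            simp only [decide_eq_false_iff_not, not_le]
            omega
          rw [hfalse]
          rfl
        · rw [if_neg (by push Not; exact ⟨by omega, by omega⟩)]
          have htrue : (decide (((r.toNat : Nat) : Int) ≤ (fmL.length : Int) - m)) = true := by
            simp only [decide_eq_true_eq]
            omega
          rw [htrue, if_pos rfl, List.map_cons, ← hjr, ih (r.toNat + 1) (by omega) (by omega)]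

-- B's slice test at a natural index IS the startswith test of matchB
theorem slice_test_eq (fmL patL : List Char) (k : Nat) :
    (PySem.List.slice fmL (some (k : Int)) (some ((k : Int) + (patL.length : Int))) == patL)
      = matchB fmL patL k := by
  rw [PySem.List.slice_natCast_add]
  rcases h : PySem.Chars.startswith (fmL.drop k) patL with hf | ht
  · simp only [matchB, h, beq_eq_false_iff_ne, ne_eq]
    intro heq
    have hpre : patL <+: fmL.drop k := heq ▸ List.take_prefix _ _
    exact (Bool.eq_false_iff.mp h) ((PySem.Chars.startswith_iff _ _).mpr hpre)
  · simp only [matchB, h, beq_iff_eq]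
    have hpre : patL <+: fmL.drop k := (PySem.Chars.startswith_iff _ _).mp h
    exact (List.prefix_iff_eq_take.mp hpre).symm

-- positions past len(fm) - len(pattern) cannot match (the two ranges filter the same)
theorem filter_range_shrink (fmL patL : List Char) (hle : patL.length ≤ fmL.length) :
    (List.range (fmL.length + 1)).filter (matchB fmL patL)
      = (List.range (fmL.length - patL.length + 1)).filter (matchB fmL patL) := by
  set a := fmL.length - patL.length + 1 with ha
  have hsplit : List.range (fmL.length + 1) =
      List.range a ++ List.range' a (fmL.length + 1 - a) := by
    rw [List.range_eq_range', List.range_eq_range']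
    have := @List.range'_append 0 a (fmL.length + 1 - a) 1
    rw [one_mul, zero_add, show a + (fmL.length + 1 - a) = fmL.length + 1 by omega] at this
    exact this.symm
  rw [hsplit, List.filter_append]
  have htail : (List.range' a (fmL.length + 1 - a)).filter (matchB fmL patL) = [] := by
    apply List.filter_eq_nil_iff.mpr
    intro i hi
    have hia := (List.mem_range'_1.mp hi).1
    have hib := (List.mem_range'_1.mp hi).2
    simp only [matchB, PySem.Chars.startswith_iff]
    intro hpre
    have := hpre.length_le
    rw [List.length_drop] at this
    omega
  rw [htail, List.append_nil]

-- the two takeWhile predicates agree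
theorem predicates_eq (n m : Int) (k : Nat) :
    (!decide ((k : Int) + m > n)) = decide ((k : Int) ≤ n - m) := by
  by_cases h : (k : Int) + m > n
  · simp only [h, decide_true, Bool.not_true]
    symm
    simp only [decide_eq_false_iff_not, not_le]
    omega
  · simp only [h, decide_false, Bool.not_false]
    symm
    simp only [decide_eq_true_eq]
    omega

-- B's whole pipeline rewritten over Nat indices, in A's normal form
theorem alt_pipeline_eq (fmL patL : List Char) (m : Int) :
    (((PySem.List.pyRange 0 ((fmL.length : Int) - (patL.length : Int) + 1) 1).filter
        (fun i => PySem.List.slice fmL (some i) (some (i + (patL.length : Int))) == patL)).takeWhile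
          (fun i => !decide (i + m > (fmL.length : Int)))).map (fun i => i + (patL.length : Int))
    = (((List.range (fmL.length + 1)).filter (matchB fmL patL)).takeWhile
        (fun i : Nat => decide ((i : Int) ≤ (fmL.length : Int) - m))).map
      (fun i : Nat => (i : Int) + (patL.length : Int)) := by
  by_cases hle : patL.length ≤ fmL.length
  · have hb : ((fmL.length : Int) - (patL.length : Int) + 1)
        = ((fmL.length - patL.length + 1 : Nat) : Int) := by push_cast [hle]; ring
    rw [hb, PySem.List.pyRange_one]
    simp only [Int.sub_zero, Int.toNat_natCast, List.filter_map, List.takeWhile_map,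
      List.map_map, Function.comp_def, zero_add, slice_test_eq, predicates_eq]
    rw [filter_range_shrink fmL patL hle]
  · have hnil : PySem.List.pyRange 0 ((fmL.length : Int) - (patL.length : Int) + 1) 1 = [] := by
      apply PySem.List.pyRange_one_eq_nil
      omega
    have hfil : (List.range (fmL.length + 1)).filter (matchB fmL patL) = [] := by
      apply List.filter_eq_nil_iff.mpr
      intro i hi
      simp only [matchB, PySem.Chars.startswith_iff]
      intro hpre
      have := hpre.length_le
      rw [List.length_drop] at this
      have hi' := List.mem_range.mp hi
      omega
    rw [hnil, hfil]
    rfl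

-- ===== VERDICT (by name: the statement is the Claim_ definition above) =====
theorem iter_pattern_spec : Claim_equal_iter_pattern := by
  intro fm gaplen minlen pattern _
  unfold Spec_iter_pattern iter_pattern iter_pattern_alt
  simp only []
  rw [loopA_eq _ _ _ _ 0 (by omega) (by omega), alt_pipeline_eq]
  unfold matchesFrom
  rw [List.range_eq_range', Nat.sub_zero]
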